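-- pv_equiv track=rewrite | github.com/delos0/Image-Processing-Application | src/main/Image_processing.py | sort_rows_border
-- ===== SOURCE A (Python) =====
-- def sort_rows_border(matrix):
--
--     for i in range(len(matrix)):
--         start = 0
--         end = len(matrix[i])
--         for j in range(len(matrix[i])):
--             if matrix[i][j] == 0:
--                 end = j
--                 temp = sorted(matrix[i][start:end])
--                 for k in range(start, end):
--                     matrix[i][k] = temp[k-start]
--                 start = j+1
--         end = len(matrix[i])
--         temp = sorted(matrix[i][start:end])
--         for k in range(start, end):
--             matrix[i][k] = temp[k - start]
--     return matrix
-- ===== SOURCE B (Python) =====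
-- def sort_rows_border(matrix):
--     for row in matrix:
--         pairs = []
--         seg = 0
--         for x in row:
--             if x == 0:
--                 seg += 1
--             else:
--                 pairs.append((seg, x))
--         pairs.sort()
--         t = 0
--         for j in range(len(row)):
--             if row[j] != 0:
--                 row[j] = pairs[t][1]
--                 t += 1
--     return matrix
-- ===== Notes on version B (the rewrite author's own statement) =====
-- stated objective: alternative
-- what changed: Instead of A's per-segment slice sort with start/end index bookkeeping, B tags each nonzero element with its segment number (count of zeros before it), performs one global lexicographic sort of the (tag, value) pairs per row, and writes the sorted values back into the nonzero positions in order, leaving zeros untouched.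
import Mathlib
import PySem

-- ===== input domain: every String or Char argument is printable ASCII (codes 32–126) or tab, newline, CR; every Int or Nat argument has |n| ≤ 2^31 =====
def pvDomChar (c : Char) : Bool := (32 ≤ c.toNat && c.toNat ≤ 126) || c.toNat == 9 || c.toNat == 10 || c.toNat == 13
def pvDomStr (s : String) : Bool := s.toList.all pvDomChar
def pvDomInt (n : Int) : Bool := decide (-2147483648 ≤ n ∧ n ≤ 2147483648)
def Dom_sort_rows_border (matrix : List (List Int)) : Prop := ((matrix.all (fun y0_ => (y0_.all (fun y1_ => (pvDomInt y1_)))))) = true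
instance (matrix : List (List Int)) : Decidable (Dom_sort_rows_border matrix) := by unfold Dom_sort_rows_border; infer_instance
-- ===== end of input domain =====

-- B replaces A's per-segment slice sort (start/end index bookkeeping, one sort per segment)
-- by one global lexicographic sort per row of (segment-number, value) pairs, written back into
-- the nonzero positions (objective: alternative). Both A and B mutate the matrix's rows in
-- place in the same way; the equivalence proved here is about the return value.

-- sorted(xs) with no key, ascending
def srt (xs : List Int) : List Int := PySem.List.sorted xs (fun x => x) false

-- ===== PORT A =====
-- 'for k in range(start, end): matrix[i][k] = temp[k-start]'
-- (k is always a nonnegative in-range index here, so List.set k.toNat is exact)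
def aWrite (r temp : List Int) (start fin : Int) : List Int :=
  (PySem.List.pyRange start fin 1).foldl
    (fun acc k => acc.set k.toNat ((PySem.List.pyGet? temp (k - start)).getD 0)) r

-- the 'for j in range(len(matrix[i]))' loop, one fuel tick per j
def aJLoop (fuel : Nat) (r : List Int) (start j : Int) : List Int × Int :=
  match fuel with
  | 0 => (r, start)
  | Nat.succ fuel' =>
    if (PySem.List.pyGet? r j).getD 0 = 0 then
      aJLoop fuel'
        (aWrite r (srt (PySem.List.slice r (some start) (some j))) start j)
        (j + 1) (j + 1)
    else
      aJLoop fuel' r start (j + 1)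

def sort_rows_border (matrix : List (List Int)) : List (List Int) :=
  matrix.map (fun row =>
    let p := aJLoop row.length row 0 0
    aWrite p.1 (srt (PySem.List.slice p.1 (some p.2) (some (row.length : Int)))) p.2 (row.length : Int))

-- ===== PORT B =====
-- first pass: 'if x == 0: seg += 1 else: pairs.append((seg, x))'
def bTagStep (st : Int × List (Int × Int)) (x : Int) : Int × List (Int × Int) :=
  if x = 0 then (st.1 + 1, st.2) else (st.1, st.2 ++ [(st.1, x)])

-- write-back pass: 'if row[j] != 0: row[j] = pairs[t][1]; t += 1' — the cursor t always
-- points at the head of the not-yet-consumed suffix of pairs, ported as head consumption;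
-- the [] branch is unreachable (pairs holds exactly one entry per nonzero of the row)
def bRebStep (st : List (Int × Int) × List Int) (x : Int) : List (Int × Int) × List Int :=
  if x = 0 then (st.1, st.2 ++ [x])
  else match st.1 with
    | [] => ([], st.2 ++ [x])
    | p :: rest => (rest, st.2 ++ [p.2])

def sort_rows_border_alt (matrix : List (List Int)) : List (List Int) :=
  matrix.map (fun row =>
    let pairs := (row.foldl bTagStep (0, [])).2
    let sp := PySem.List.sorted2 pairs Prod.fst Prod.snd false   -- pairs.sort(): lexicographic on tuples
    (row.foldl bRebStep (sp, [])).2)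

-- ===== PRECONDITION & SPEC =====
def Spec_sort_rows_border (matrix : List (List Int)) (out : List (List Int)) : Prop := out = sort_rows_border_alt matrix
instance (matrix : List (List Int)) (out : List (List Int)) : Decidable (Spec_sort_rows_border matrix out) := by unfold Spec_sort_rows_border; infer_instance

-- ===== CLAIM (what is proved, stated in full; the proofs are below) =====
def Claim_equal_sort_rows_border : Prop := ∀ (matrix : List (List Int)), Dom_sort_rows_border matrix → Spec_sort_rows_border matrix (sort_rows_border matrix)

-- ===== LEMMAS AND PROOFS =====

-- spec of one row: processed prefix through the last zero (segments sorted, zeros kept),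
-- and the trailing segment
def finState (s : List Int) : List Int × List Int :=
  match h : s.dropWhile (fun x => x != 0) with
  | [] => ([], s.takeWhile (fun x => x != 0))
  | _ :: rest =>
      (srt (s.takeWhile (fun x => x != 0)) ++ 0 :: (finState rest).1, (finState rest).2)
termination_by s.length
decreasing_by
  have hs := (List.dropWhile_sublist (p := fun x : Int => x != 0) (l := s)).length_le
  simp [h] at hs; omega

lemma finState_noZero (mid : List Int) (h : ∀ x ∈ mid, x ≠ 0) :
    finState mid = ([], mid) := by
  have hd : mid.dropWhile (fun x => x != 0) = [] := by
    rw [List.dropWhile_eq_nil_iff]; intro x hx; simpa using h x hx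
  have ht : mid.takeWhile (fun x => x != 0) = mid := by
    conv_rhs => rw [← List.takeWhile_append_dropWhile (p := fun x : Int => x != 0) (l := mid)]
    simp [hd]
  rw [finState]
  rw [hd]
  simp [ht]

lemma finState_append (mid rest : List Int) (h : ∀ x ∈ mid, x ≠ 0) :
    finState (mid ++ 0 :: rest) =
      (srt mid ++ 0 :: (finState rest).1, (finState rest).2) := by
  have hd' : mid.dropWhile (fun x => x != 0) = [] := by
    rw [List.dropWhile_eq_nil_iff]; intro x hx; simpa using h x hx
  have ht' : mid.takeWhile (fun x => x != 0) = mid := by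
    conv_rhs => rw [← List.takeWhile_append_dropWhile (p := fun x : Int => x != 0) (l := mid)]
    simp [hd']
  have hd : (mid ++ 0 :: rest).dropWhile (fun x => x != 0) = 0 :: rest := by
    rw [List.dropWhile_append]; simp [hd']
  have ht : (mid ++ 0 :: rest).takeWhile (fun x => x != 0) = mid := by
    rw [List.takeWhile_append]; simp [ht']
  rw [finState]
  rw [hd]
  simp [ht]

lemma finState_len (s : List Int) :
    (finState s).1.length + (finState s).2.length = s.length := by
  fun_induction finState s with
  | case1 s h =>
    have := List.takeWhile_append_dropWhile (p := fun x : Int => x != 0) (l := s)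
    rw [h, List.append_nil] at this
    simp [this]
  | case2 s y rest h ih =>
    have := List.takeWhile_append_dropWhile (p := fun x : Int => x != 0) (l := s)
    have hlen : (s.takeWhile (fun x => x != 0)).length + (rest.length + 1) = s.length := by
      rw [← congrArg List.length this]; simp [h]
    simp [srt, PySem.List.length_sorted]
    omega

lemma aWrite_splice : ∀ (temp cur pre : List Int), temp.length ≤ cur.length →
    aWrite (pre ++ cur) temp (pre.length : Int) ((pre.length : Int) + (temp.length : Int)) =
      pre ++ temp ++ cur.drop temp.length := by
  intro temp
  induction temp with
  | nil =>
    intro cur pre h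
    unfold aWrite
    rw [PySem.List.pyRange_one_eq_nil (by simp)]
    simp
  | cons t ts ih =>
    intro cur pre h
    match cur with
    | [] => simp at h
    | c :: cur' =>
      unfold aWrite
      rw [PySem.List.pyRange_one_cons (by simp)]
      simp only [List.foldl_cons]
      have h1 : (pre ++ c :: cur').set ((pre.length : Int)).toNat
          ((PySem.List.pyGet? (t :: ts) ((pre.length : Int) - (pre.length : Int))).getD 0)
          = (pre ++ [t]) ++ cur' := by
        simp [List.set_append_right _ _ (le_refl _)]
      rw [h1]
      have h2 : (pre.length : Int) + ((t :: ts).length : Int)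
          = (((pre ++ [t]).length : Nat) : Int) + (ts.length : Int) := by
        simp; ring
      rw [h2]
      have h3 : ∀ (acc : List Int), ∀ k ∈ PySem.List.pyRange ((pre.length : Int) + 1) ((((pre ++ [t]).length : Nat) : Int) + (ts.length : Int)) 1,
          acc.set k.toNat ((PySem.List.pyGet? (t :: ts) (k - (pre.length : Int))).getD 0)
          = acc.set k.toNat ((PySem.List.pyGet? ts (k - (((pre ++ [t]).length : Nat) : Int))).getD 0) := by
        intro acc k hk
        rw [PySem.List.mem_pyRange_one] at hk
        have hm : k - (((pre ++ [t]).length : Nat) : Int) = ((k - (pre.length : Int) - 1).toNat : Int) := by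
          simp; omega
        have hm2 : k - (pre.length : Int) = ((k - (pre.length : Int) - 1).toNat : Int) + 1 := by
          simp at hk ⊢; omega
        rw [hm2, PySem.List.pyGet?_cons_succ, hm]
      rw [PySem.List.foldl_congr_mem _ _ _ _ h3]
      have h4 : (pre.length : Int) + 1 = (((pre ++ [t]).length : Nat) : Int) := by simp
      rw [h4]
      have := ih cur' (pre ++ [t]) (by simpa using Nat.le_of_succ_le_succ (by simpa using h))
      rw [aWrite] at this
      rw [this]
      simp

lemma aJLoop_spec : ∀ (rest mid done : List Int), (∀ x ∈ mid, x ≠ 0) →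
    aJLoop rest.length (done ++ mid ++ rest) (done.length : Int)
        ((done.length : Int) + (mid.length : Int)) =
      (done ++ (finState (mid ++ rest)).1 ++ (finState (mid ++ rest)).2,
       ((done.length + (finState (mid ++ rest)).1.length : Nat) : Int)) := by
  intro rest
  induction rest with
  | nil =>
    intro mid done h
    simp only [List.length_nil, aJLoop, List.append_nil]
    rw [finState_noZero mid h]
    simp
  | cons x rest' ih =>
    intro mid done h
    simp only [List.length_cons, aJLoop]
    have hget : (PySem.List.pyGet? (done ++ mid ++ x :: rest') ((done.length : Int) + (mid.length : Int))).getD 0 = x := by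
      have he : done ++ mid ++ x :: rest' = (done ++ mid) ++ x :: rest' := by simp
      have hl : (done.length : Int) + (mid.length : Int) = (((done ++ mid).length : Nat) : Int) := by simp
      rw [he, hl, PySem.List.pyGet?_append_length]
      rfl
    have hslice : PySem.List.slice (done ++ mid ++ x :: rest') (some (done.length : Int)) (some ((done.length : Int) + (mid.length : Int))) = mid := by
      rw [PySem.List.slice_natCast_add]
      rw [List.append_assoc, List.drop_left, List.take_left]
    by_cases hx : x = 0
    · rw [if_pos (by rw [hget, hx])]
      rw [hslice]
      have hlen : ((done.length : Int) + (mid.length : Int)) = (done.length : Int) + ((srt mid).length : Int) := by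
        simp [srt, PySem.List.length_sorted]
      rw [hlen, List.append_assoc, aWrite_splice (srt mid) (mid ++ x :: rest') done
            (by simp [srt, PySem.List.length_sorted])]
      have hdrop : (mid ++ x :: rest').drop (srt mid).length = x :: rest' := by
        simp [srt, PySem.List.length_sorted]
      rw [hdrop, hx]
      have hI := ih [] (done ++ srt mid ++ [0]) (by simp)
      simp only [List.length_nil, Nat.cast_zero, add_zero, List.append_nil, List.nil_append] at hI
      have he2 : done ++ srt mid ++ 0 :: rest' = (done ++ srt mid ++ [0]) ++ rest' := by simp
      have hj : (done.length : Int) + ((srt mid).length : Int) + 1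
          = (((done ++ srt mid ++ [0]).length : Nat) : Int) := by
        simp; ring
      rw [he2, hj, hI]
      rw [finState_append mid rest' h]
      simp [srt, PySem.List.length_sorted]
      ring
    · rw [if_neg (by rw [hget]; exact hx)]
      have he2 : done ++ mid ++ x :: rest' = done ++ (mid ++ [x]) ++ rest' := by simp
      have hj : (done.length : Int) + (mid.length : Int) + 1
          = (done.length : Int) + (((mid ++ [x]).length : Nat) : Int) := by
        simp; ring
      rw [he2, hj, ih (mid ++ [x]) done (by intro y hy; rcases List.mem_append.1 hy with h1 | h1
                                            · exact h y h1
                                            · simp at h1; subst h1; exact hx)]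
      have : (mid ++ [x]) ++ rest' = mid ++ x :: rest' := by simp
      rw [this]

lemma rowA_eq (row : List Int) :
    (let p := aJLoop row.length row 0 0
     aWrite p.1 (srt (PySem.List.slice p.1 (some p.2) (some (row.length : Int)))) p.2 (row.length : Int)) =
    (finState row).1 ++ srt (finState row).2 := by
  have hA := aJLoop_spec row [] [] (by simp)
  simp only [List.nil_append, List.length_nil, Nat.cast_zero, add_zero, zero_add] at hA
  simp only [hA]
  set P := (finState row).1 with hP
  set Q := (finState row).2 with hQ
  have hlen : P.length + Q.length = row.length := finState_len row
  have hslice : PySem.List.slice (P ++ Q) (some (P.length : Int)) (some (row.length : Int)) = Q := by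
    have : (row.length : Int) = (P.length : Int) + (Q.length : Int) := by omega
    rw [this, PySem.List.slice_natCast_add, List.drop_left]
    exact List.take_length ..
  rw [hslice]
  have hfin : (row.length : Int) = (P.length : Int) + ((srt Q).length : Int) := by
    simp [srt, PySem.List.length_sorted]; omega
  rw [hfin, aWrite_splice (srt Q) Q P (by simp [srt, PySem.List.length_sorted])]
  simp [srt, PySem.List.length_sorted]

-- ===== B-side lemmas =====

-- the lexicographic before-predicate sorted2 uses
def plt (a b : Int × Int) : Bool :=
  decide (a.1 < b.1) || (!decide (b.1 < a.1) && decide (a.2 < b.2))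

def ins (acc : List (Int × Int)) (x : Int × Int) : List (Int × Int) :=
  PySem.List.insertBy plt x acc

lemma s2_eq (xs : List (Int × Int)) :
    PySem.List.sorted2 xs Prod.fst Prod.snd false = xs.foldl ins [] := rfl

-- the tag pass, starting at segment number k
def tagFrom (k : Int) (s : List Int) : List (Int × Int) := (s.foldl bTagStep (k, [])).2

lemma tag_acc : ∀ (s : List Int) (k : Int) (acc : List (Int × Int)),
    (s.foldl bTagStep (k, acc)).2 = acc ++ tagFrom k s := by
  intro s
  induction s with
  | nil => intro k acc; simp [tagFrom]
  | cons x s' ih =>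
    intro k acc
    simp only [List.foldl_cons, bTagStep]
    by_cases hx : x = 0
    · rw [if_pos hx]
      have hT : tagFrom k (x :: s') = tagFrom (k + 1) s' := by
        simp [tagFrom, bTagStep, hx]
      rw [hT, ih]
    · rw [if_neg hx]
      have hT : tagFrom k (x :: s') = (k, x) :: tagFrom k s' := by
        simp only [tagFrom, List.foldl_cons, bTagStep, if_neg hx, List.nil_append]
        rw [ih k [(k, x)]]
        rfl
      rw [hT, ih k (acc ++ [(k, x)])]
      simp

lemma tagFrom_cons_zero (k : Int) (s : List Int) :
    tagFrom k (0 :: s) = tagFrom (k + 1) s := by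
  simp [tagFrom, bTagStep]

lemma tagFrom_cons_ne (k : Int) (x : Int) (s : List Int) (hx : x ≠ 0) :
    tagFrom k (x :: s) = (k, x) :: tagFrom k s := by
  simp only [tagFrom, List.foldl_cons, bTagStep, if_neg hx]
  rw [tag_acc]
  simp [tagFrom]

lemma tagFrom_le : ∀ (s : List Int) (k : Int) (p : Int × Int), p ∈ tagFrom k s → k ≤ p.1 := by
  intro s
  induction s with
  | nil => intro k p hp; simp [tagFrom] at hp
  | cons x s' ih =>
    intro k p hp
    by_cases hx : x = 0
    · subst hx
      rw [tagFrom_cons_zero] at hp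
      have := ih (k + 1) p hp
      omega
    · rw [tagFrom_cons_ne k x s' hx] at hp
      rcases List.mem_cons.1 hp with h1 | h1
      · subst h1; exact le_refl _
      · exact ih k p h1

lemma tagFrom_noZero : ∀ (mid : List Int), (∀ x ∈ mid, x ≠ 0) → ∀ k,
    tagFrom k mid = mid.map (fun x => (k, x)) := by
  intro mid
  induction mid with
  | nil => intro _ k; simp [tagFrom]
  | cons x mid' ih =>
    intro h k
    rw [tagFrom_cons_ne k x mid' (h x (by simp))]
    rw [ih (fun y hy => h y (by simp [hy])) k]
    simp

lemma tagFrom_append (mid rest : List Int) (h : ∀ x ∈ mid, x ≠ 0) (k : Int) :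
    tagFrom k (mid ++ 0 :: rest) = mid.map (fun x => (k, x)) ++ tagFrom (k + 1) rest := by
  induction mid generalizing k with
  | nil => simp [tagFrom_cons_zero]
  | cons x mid' ih =>
    rw [List.cons_append, tagFrom_cons_ne k x _ (h x (by simp))]
    rw [ih (fun y hy => h y (by simp [hy])) k]
    simp

lemma insertBy_cons {α : Type} (before : α → α → Bool) (x y : α) (ys : List α) :
    PySem.List.insertBy before x (y :: ys)
      = if before x y then x :: y :: ys else y :: PySem.List.insertBy before x ys := rfl

lemma insertBy_skip : ∀ (C D : List (Int × Int)) (x : Int × Int),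
    (∀ y ∈ C, plt x y = false) →
    PySem.List.insertBy plt x (C ++ D) = C ++ PySem.List.insertBy plt x D := by
  intro C
  induction C with
  | nil => intro D x _; simp
  | cons c C' ih =>
    intro D x h
    rw [List.cons_append, insertBy_cons, h c (by simp),
        ih D x (fun y hy => h y (by simp [hy]))]
    simp

lemma foldl_ins_skip : ∀ (B C D : List (Int × Int)),
    (∀ x ∈ B, ∀ y ∈ C, plt x y = false) →
    B.foldl ins (C ++ D) = C ++ B.foldl ins D := by
  intro B
  induction B with
  | nil => intro C D _; simp
  | cons b B' ih =>
    intro C D h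
    simp only [List.foldl_cons]
    have h1 : ins (C ++ D) b = C ++ ins D b := by
      exact insertBy_skip C D b (fun y hy => h b (by simp) y hy)
    rw [h1, ih C (ins D b) (fun x hx y hy => h x (by simp [hx]) y hy)]

lemma insertBy_tag (k : Int) (x : Int) : ∀ (ys : List Int),
    PySem.List.insertBy plt (k, x) (ys.map (fun y => (k, y)))
      = (PySem.List.insertBy (fun a b => decide (a < b)) x ys).map (fun y => (k, y)) := by
  intro ys
  induction ys with
  | nil => rfl
  | cons y ys' ih =>
    simp only [List.map_cons, insertBy_cons]
    have hp : plt (k, x) (k, y) = decide (x < y) := by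
      simp [plt]
    rw [hp]
    by_cases hxy : x < y
    · simp [hxy]
    · rw [if_neg (by simpa using hxy), if_neg (by simpa using hxy)]
      simp [ih]

lemma foldl_ins_tag (k : Int) : ∀ (mid acc : List Int),
    (mid.map (fun y => (k, y))).foldl ins (acc.map (fun y => (k, y)))
      = (mid.foldl (fun a x => PySem.List.insertBy (fun u v => decide (u < v)) x a) acc).map (fun y => (k, y)) := by
  intro mid
  induction mid with
  | nil => intro acc; simp
  | cons m mid' ih =>
    intro acc
    simp only [List.map_cons, List.foldl_cons, ins]
    rw [insertBy_tag k m acc, ih]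

lemma s2_tag (k : Int) (mid : List Int) :
    (mid.map (fun y => (k, y))).foldl ins [] = (srt mid).map (fun y => (k, y)) := by
  have := foldl_ins_tag k mid []
  simp only [List.map_nil] at this
  rw [this, srt, PySem.List.sorted_eq_foldl_insertBy]

-- mirror of finState on the sorted tagged pairs
def sortedTag (k : Int) (s : List Int) : List (Int × Int) :=
  match h : s.dropWhile (fun x => x != 0) with
  | [] => (srt (s.takeWhile (fun x => x != 0))).map (fun x => (k, x))
  | _ :: rest =>
      (srt (s.takeWhile (fun x => x != 0))).map (fun x => (k, x)) ++ sortedTag (k + 1) rest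
termination_by s.length
decreasing_by
  have hs := (List.dropWhile_sublist (p := fun x : Int => x != 0) (l := s)).length_le
  simp [h] at hs; omega

lemma takeWhile_ne_zero (s : List Int) : ∀ x ∈ s.takeWhile (fun x => x != 0), x ≠ 0 := by
  intro x hx
  have := List.mem_takeWhile_imp hx
  simpa using this

lemma dropWhile_head_zero : ∀ {s : List Int} {y : Int} {rest : List Int},
    s.dropWhile (fun x => x != 0) = y :: rest → y = 0 := by
  intro s
  induction s with
  | nil => intro y rest h; simp at h
  | cons a s' ih =>
    intro y rest h
    rw [List.dropWhile_cons] at h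
    by_cases ha : a = 0
    · rw [if_neg (by simp [ha])] at h
      injection h with h1 _
      rw [← h1]
      exact ha
    · rw [if_pos (by simp [ha])] at h
      exact ih h

lemma sorted_tagFrom (s : List Int) (k : Int) :
    (tagFrom k s).foldl ins [] = sortedTag k s := by
  fun_induction sortedTag k s with
  | case1 k s h =>
    have hs : s = s.takeWhile (fun x => x != 0) := by
      conv_lhs => rw [← List.takeWhile_append_dropWhile (p := fun x : Int => x != 0) (l := s)]
      rw [h]; simp
    have hnz : ∀ x ∈ s, x ≠ 0 := fun x hx => takeWhile_ne_zero s x (hs ▸ hx)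
    rw [tagFrom_noZero s hnz k, s2_tag, ← hs]
  | case2 k s y rest h ih =>
    have hy : y = 0 := dropWhile_head_zero h
    set mid := s.takeWhile (fun x => x != 0) with hmid
    have hs : s = mid ++ 0 :: rest := by
      conv_lhs => rw [← List.takeWhile_append_dropWhile (p := fun x : Int => x != 0) (l := s)]
      rw [h, hy]
    have hmidne : ∀ x ∈ mid, x ≠ 0 := fun x hx => takeWhile_ne_zero s x (hmid ▸ hx)
    have ht : tagFrom k s = mid.map (fun x => (k, x)) ++ tagFrom (k + 1) rest := by
      conv_lhs => rw [hs]
      exact tagFrom_append mid rest hmidne k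
    have hside : ∀ x ∈ tagFrom (k + 1) rest, ∀ z ∈ (srt mid).map (fun x => (k, x)),
        plt x z = false := by
      intro x hx z hz
      have hx1 : k + 1 ≤ x.1 := tagFrom_le rest (k + 1) x hx
      have hz1 : z.1 = k := by
        rcases List.mem_map.1 hz with ⟨w, _, hw⟩
        rw [← hw]
      simp [plt, hz1]
      omega
    rw [ht, List.foldl_append, s2_tag]
    conv_lhs => rw [← List.append_nil ((srt mid).map (fun x => (k, x)))]
    rw [foldl_ins_skip _ _ _ hside, ih]

lemma bReb_consume : ∀ (mid : List Int), (∀ x ∈ mid, x ≠ 0) →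
    ∀ (q ps' : List (Int × Int)) (out : List Int), q.length = mid.length →
    mid.foldl bRebStep (q ++ ps', out) = (ps', out ++ q.map Prod.snd) := by
  intro mid
  induction mid with
  | nil =>
    intro _ q ps' out hq
    rw [List.length_nil, List.length_eq_zero_iff] at hq
    subst hq; simp
  | cons m mid' ih =>
    intro h q ps' out hq
    match q with
    | [] => simp at hq
    | p :: q' =>
      simp only [List.foldl_cons, bRebStep, if_neg (h m (by simp))]
      simp only [List.cons_append]
      rw [ih (fun y hy => h y (by simp [hy])) q' ps' (out ++ [p.2]) (by simpa using hq)]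
      simp

lemma bReb_spec (k : Int) (s : List Int) : ∀ (extra : List (Int × Int)) (out : List Int),
    s.foldl bRebStep (sortedTag k s ++ extra, out)
      = (extra, out ++ (finState s).1 ++ srt (finState s).2) := by
  fun_induction sortedTag k s with
  | case1 k s h =>
    intro extra out
    have hs : s = s.takeWhile (fun x => x != 0) := by
      conv_lhs => rw [← List.takeWhile_append_dropWhile (p := fun x : Int => x != 0) (l := s)]
      rw [h]; simp
    have hnz : ∀ x ∈ s, x ≠ 0 := fun x hx => takeWhile_ne_zero s x (hs ▸ hx)
    rw [finState_noZero s hnz, ← hs]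
    rw [bReb_consume s hnz _ extra out (by simp [srt, PySem.List.length_sorted])]
    simp
  | case2 k s y rest h ih =>
    intro extra out
    have hy : y = 0 := dropWhile_head_zero h
    set mid := s.takeWhile (fun x => x != 0) with hmid
    have hs : s = mid ++ 0 :: rest := by
      conv_lhs => rw [← List.takeWhile_append_dropWhile (p := fun x : Int => x != 0) (l := s)]
      rw [h, hy]
    have hmidne : ∀ x ∈ mid, x ≠ 0 := fun x hx => takeWhile_ne_zero s x (hmid ▸ hx)
    conv_lhs => rw [hs]
    rw [List.foldl_append, List.append_assoc,
        bReb_consume mid hmidne _ _ out (by simp [srt, PySem.List.length_sorted])]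
    rw [List.foldl_cons,
        show ∀ st : List (Int × Int) × List Int, bRebStep st 0 = (st.1, st.2 ++ [0]) from
          fun st => by simp [bRebStep],
        ih]
    conv_rhs => rw [hs]
    rw [finState_append mid rest hmidne]
    simp [List.map_map]

lemma rowB_eq (row : List Int) :
    (let pairs := (row.foldl bTagStep (0, [])).2
     let sp := PySem.List.sorted2 pairs Prod.fst Prod.snd false
     (row.foldl bRebStep (sp, [])).2) =
    (finState row).1 ++ srt (finState row).2 := by
  simp only
  rw [show (row.foldl bTagStep (0, [])).2 = tagFrom 0 row from rfl]
  rw [s2_eq, sorted_tagFrom row 0]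
  have := bReb_spec 0 row [] []
  rw [List.append_nil] at this
  rw [this]
  simp

-- ===== VERDICT (by name: the statement is the Claim_ definition above) =====
theorem sort_rows_border_spec : Claim_equal_sort_rows_border := by
  intro matrix _
  unfold Spec_sort_rows_border sort_rows_border sort_rows_border_alt
  exact List.map_congr_left (fun row _ => (rowA_eq row).trans (rowB_eq row).symm)
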